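-- pv_equiv track=rewrite | github.com/shicks255/CodeWars_Python | MusicFileRenamer/musicFileRenamer.py | cleanUpTrackNumber
-- ===== SOURCE A (Python) =====
-- def cleanUpTrackNumber(track):
--     if ('/' in track):
--         track = track[0:track.index('/')]
--         if (int(track) < 10 and track[0] != '0'):
--             track = '0' + track
--     if (len(track) < 2):
--         track = '0' + track
--     if ('(' in track):
--         track = track.replace('(', '')
--         track = track.replace(')', '')
--         track = track[0:track.index(',')]
--         return cleanUpTrackNumber(track)
--
--     return track
-- ===== SOURCE B (Python) =====
-- # B: replaces A's tail recursion by a bounded two-pass pipeline. Since the paren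
-- # branch strips every '(' before re-entering, A can recurse at most once; B runs
-- # the slash/len normalisation helper, handles the parenthesised form once, and
-- # normalises the extracted piece with the same helper. Objective: simpler.
-- def _pad(t):
--     if '/' in t:
--         t = t[0:t.index('/')]
--         if int(t) < 10 and t[0] != '0':
--             t = '0' + t
--     if len(t) < 2:
--         t = '0' + t
--     return t
--
-- def cleanUpTrackNumber(track):
--     t = _pad(track)
--     if '(' in t:
--         inner = t.replace('(', '').replace(')', '')
--         t = _pad(inner[0:inner.index(',')])
--     return t
-- ===== Notes on version B (the rewrite author's own statement) =====
-- stated objective: simpler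
-- what changed: A's unbounded tail recursion is replaced by a straight-line two-pass pipeline: a shared _pad helper (slash truncation + zero padding) applied once to the input and, if a parenthesised form is present, once more to the piece extracted before the first comma - no recursion, exploiting that the paren branch strips every '(' so A can re-enter at most once.
import Mathlib
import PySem

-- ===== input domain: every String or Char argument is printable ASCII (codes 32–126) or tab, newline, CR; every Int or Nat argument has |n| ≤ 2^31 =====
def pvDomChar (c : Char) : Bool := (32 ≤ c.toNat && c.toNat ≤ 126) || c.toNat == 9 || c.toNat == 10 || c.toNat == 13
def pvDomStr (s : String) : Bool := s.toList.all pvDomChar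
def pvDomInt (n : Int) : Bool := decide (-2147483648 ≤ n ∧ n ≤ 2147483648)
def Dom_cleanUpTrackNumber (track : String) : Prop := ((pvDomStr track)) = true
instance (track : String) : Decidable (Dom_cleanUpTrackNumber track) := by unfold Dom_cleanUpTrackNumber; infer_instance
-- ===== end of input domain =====

-- B replaces A's tail recursion by a bounded two-pass pipeline (a shared pad helper applied
-- at most twice); no argument is mutated, the equivalence is about the return value.

-- ===== PORT A =====
-- Python exceptions (ValueError from int()/index(','), IndexError) are modelled as `none`;
-- the wrapper's `.getD track` is never reached on inputs satisfying Pre_.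
def cleanUpTrackNumberAux : Nat → String → Option String
  | 0, _ => none
  | fuel+1, track =>
    let track1? : Option String :=
      if PySem.Str.isIn "/" track then
        let t := PySem.Str.slice track (some 0) (some (PySem.Str.find track "/"))
        match PySem.Int.ofStr? t with
        | none => none
        | some n =>
          if n < 10 then
            match PySem.Str.pyGet? t 0 with
            | none => none
            | some c => if c != '0' then some ("0" ++ t) else some t
          else some t
      else some track
    match track1? with
    | none => none
    | some t1 =>
      let t2 := if PySem.Str.len t1 < 2 then "0" ++ t1 else t1
      if PySem.Str.isIn "(" t2 then
        let r := PySem.Str.replace (PySem.Str.replace t2 "(" "") ")" ""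
        if PySem.Str.isIn "," r then
          cleanUpTrackNumberAux fuel (PySem.Str.slice r (some 0) (some (PySem.Str.find r ",")))
        else none
      else some t2

def cleanUpTrackNumber (track : String) : String :=
  (cleanUpTrackNumberAux (track.toList.length + 1) track).getD track

-- ===== PORT B =====
-- transliteration of Source B's _pad helper (none = the int() ValueError / IndexError)
def padTrack (t : String) : Option String :=
  (if PySem.Str.isIn "/" t then
     let p := PySem.Str.slice t (some 0) (some (PySem.Str.find t "/"))
     (PySem.Int.ofStr? p).bind (fun n =>
       if n < 10 then (PySem.Str.pyGet? p 0).map (fun c => if c != '0' then "0" ++ p else p)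
       else some p)
   else some t).map (fun u => if PySem.Str.len u < 2 then "0" ++ u else u)

def cleanUpTrackNumber_alt (track : String) : String :=
  ((padTrack track).bind (fun t =>
    if PySem.Str.isIn "(" t then
      let inner := PySem.Str.replace (PySem.Str.replace t "(" "") ")" ""
      if PySem.Str.isIn "," inner then
        padTrack (PySem.Str.slice inner (some 0) (some (PySem.Str.find inner ",")))
      else none
    else some t)).getD track

-- ===== PRECONDITION & SPEC =====
-- Pre_ excludes exactly the inputs on which the Python A raises: a '/' whose prefix is not a
-- valid int literal (ValueError from int(), including the empty prefix), and a slash-free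
-- input containing '(' but no ',' (ValueError from .index(',')).
def Pre_cleanUpTrackNumber (track : String) : Prop :=
  (PySem.Str.isIn "/" track = true →
    (PySem.Int.ofStr? (PySem.Str.slice track (some 0) (some (PySem.Str.find track "/")))).isSome = true)
  ∧ (PySem.Str.isIn "/" track = false → PySem.Str.isIn "(" track = true →
      PySem.Str.isIn "," track = true)
instance (track : String) : Decidable (Pre_cleanUpTrackNumber track) := by
  unfold Pre_cleanUpTrackNumber; infer_instance

def pvWitness_cleanUpTrackNumber : String := "(3,Title)"

def Spec_cleanUpTrackNumber (track : String) (out : String) : Prop := out = cleanUpTrackNumber_alt track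
instance (track : String) (out : String) : Decidable (Spec_cleanUpTrackNumber track out) := by unfold Spec_cleanUpTrackNumber; infer_instance

-- ===== CLAIM (what is proved, stated in full; the proofs are below) =====
def Claim_equal_cleanUpTrackNumber : Prop := ∀ (track : String), Dom_cleanUpTrackNumber track → Pre_cleanUpTrackNumber track → Spec_cleanUpTrackNumber track (cleanUpTrackNumber track)

-- ===== LEMMAS AND PROOFS =====

-- `sub in s` for a one-character sub is list membership
lemma infix_singleton_iff {c : Char} {l : List Char} : [c] <:+: l ↔ c ∈ l := by
  constructor
  · intro h; exact h.mem (by simp)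
  · intro h
    obtain ⟨l₁, l₂, rfl⟩ := List.append_of_mem h
    exact ⟨l₁, l₂, by simp⟩

lemma isIn_true_iff {sub s : String} {c : Char} (hsub : sub.toList = [c]) :
    PySem.Str.isIn sub s = true ↔ c ∈ s.toList := by
  rw [PySem.Str.isIn_iff_infix, hsub]; exact infix_singleton_iff

lemma isIn_false_iff {sub s : String} {c : Char} (hsub : sub.toList = [c]) :
    PySem.Str.isIn sub s = false ↔ c ∉ s.toList := by
  rw [← Bool.not_eq_true, not_iff_not]; exact isIn_true_iff hsub

-- characters of replace.go's output come from the input list, the accumulator or `new`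
lemma mem_replace_go {old new : List Char} {c : Char} :
    ∀ (fuel : Nat) (l acc : List Char), c ∈ PySem.Chars.replace.go old new fuel l acc →
      c ∈ l ∨ c ∈ acc ∨ c ∈ new := by
  intro fuel
  induction fuel with
  | zero =>
    intro l acc h
    rw [PySem.Chars.replace.go] at h
    rcases List.mem_append.1 h with h | h
    · exact Or.inr (Or.inl (List.mem_reverse.1 h))
    · exact Or.inl h
  | succ f ih =>
    intro l acc h
    match l with
    | [] =>
      rw [PySem.Chars.replace.go] at h
      · exact Or.inr (Or.inl (List.mem_reverse.1 h))
      · omega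
    | c' :: t =>
      rw [PySem.Chars.replace.go] at h
      by_cases hp : old.isPrefixOf (c' :: t) = true
      · simp only [hp, if_true] at h
        rcases ih _ _ h with h | h | h
        · exact Or.inl (List.mem_of_mem_drop h)
        · rcases List.mem_append.1 h with h | h
          · exact Or.inr (Or.inr (List.mem_reverse.1 h))
          · exact Or.inr (Or.inl h)
        · exact Or.inr (Or.inr h)
      · simp only [Bool.not_eq_true] at hp
        simp only [hp] at h
        rcases ih _ _ h with h | h | h
        · exact Or.inl (List.mem_cons_of_mem _ h)
        · rcases List.mem_cons.1 h with h | h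
          · exact Or.inl (h ▸ List.mem_cons_self)
          · exact Or.inr (Or.inl h)
        · exact Or.inr (Or.inr h)

-- replacing the one-character pattern [c] by "" removes every c
lemma not_mem_replace_go_self {c : Char} :
    ∀ (fuel : Nat) (l acc : List Char), l.length ≤ fuel → c ∉ acc →
      c ∉ PySem.Chars.replace.go [c] [] fuel l acc := by
  intro fuel
  induction fuel with
  | zero =>
    intro l acc hlen hacc
    have : l = [] := List.eq_nil_of_length_eq_zero (Nat.le_zero.1 hlen)
    subst this
    rw [PySem.Chars.replace.go]
    simpa using hacc
  | succ f ih =>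
    intro l acc hlen hacc
    match l with
    | [] =>
      rw [PySem.Chars.replace.go]
      · simpa using hacc
      · omega
    | c' :: t =>
      rw [PySem.Chars.replace.go]
      by_cases hp : List.isPrefixOf [c] (c' :: t) = true
      · simp only [hp, if_true]
        exact ih _ _ (by simp at hlen ⊢; omega) (by simpa using hacc)
      · simp only [Bool.not_eq_true] at hp
        simp only [hp]
        have hne : c ≠ c' := by
          simp [List.isPrefixOf] at hp
          exact fun he => hp (by simp [he])
        exact ih _ _ (by simp at hlen ⊢; omega) (by simp [hacc, hne])

lemma mem_replace {s old new : String} {c : Char}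
    (h : c ∈ (PySem.Str.replace s old new).toList) : c ∈ s.toList ∨ c ∈ new.toList := by
  rw [PySem.Str.toList_replace] at h
  unfold PySem.Chars.replace at h
  split at h
  · rcases List.mem_append.1 h with h | h
    · exact Or.inr h
    · obtain ⟨x, hx, hmem⟩ := List.mem_flatMap.1 h
      rcases List.mem_cons.1 hmem with h | h
      · exact Or.inl (h ▸ hx)
      · exact Or.inr h
  · rcases mem_replace_go _ _ _ h with h | h | h
    · exact Or.inl h
    · simp at h
    · exact Or.inr h

lemma not_mem_replace_self {s old new : String} {c : Char}
    (ho : old.toList = [c]) (hn : new.toList = []) :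
    c ∉ (PySem.Str.replace s old new).toList := by
  rw [PySem.Str.toList_replace, ho, hn]
  unfold PySem.Chars.replace
  simp only [List.isEmpty_cons, if_false, Bool.false_eq_true]
  exact not_mem_replace_go_self _ _ _ le_rfl (by simp)

-- characters of the slice track[0:track.index(sub)] avoid sub's character
lemma not_mem_slice_find {s sub : String} {c : Char} (hsub : sub.toList = [c])
    (h : PySem.Str.isIn sub s = true) :
    c ∉ (PySem.Str.slice s (some 0) (some (PySem.Str.find s sub))).toList := by
  intro hmem
  have hinf : sub.toList <:+: s.toList := (PySem.Str.isIn_iff_infix sub s).1 h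
  have hfind : (0:Int) ≤ PySem.Chars.find s.toList sub.toList := by
    have := (PySem.Str.find_nonneg_iff s sub).2 hinf
    simpa using this
  have hspec := (PySem.Chars.find_spec hfind).2
  have hfe : PySem.Str.find s sub = PySem.Chars.find s.toList sub.toList := by simp
  rw [PySem.Str.toList_slice, PySem.Chars.slice_eq_listSlice, PySem.List.slice_zero_start,
      hfe, PySem.List.slice_to _ hfind] at hmem
  obtain ⟨i, hi, hget⟩ := List.getElem_of_mem hmem
  have hlen : i < (PySem.Chars.find s.toList sub.toList).toNat := by
    have h' := hi; rw [List.length_take] at h'; omega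
  have hil : i < s.toList.length := by
    have h' := hi; rw [List.length_take] at h'; omega
  rw [List.getElem_take] at hget
  refine hspec i hlen ?_
  rw [hsub, List.drop_eq_getElem_cons hil, hget]
  exact ⟨_, rfl⟩

-- characters survive slicing
lemma mem_of_mem_strSlice {s : String} {a b : Option Int} {c : Char}
    (h : c ∈ (PySem.Str.slice s a b).toList) : c ∈ s.toList := by
  rw [PySem.Str.toList_slice, PySem.Chars.slice_eq_listSlice] at h
  exact PySem.List.mem_of_mem_slice _ _ _ h

-- characters of the length-padded string
lemma mem_pad {c : Char} {u : String}
    (h : c ∈ (if PySem.Str.len u < 2 then "0" ++ u else u).toList) :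
    c = '0' ∨ c ∈ u.toList := by
  split at h
  · rw [String.toList_append] at h
    rcases List.mem_append.1 h with h | h
    · left; simpa using h
    · exact Or.inr h
  · exact Or.inr h

-- the crux: on a string without '/' and without '(', A's recursion and Source B's _pad
-- both return the length-padded string
lemma core_eq (m : Nat) (s : String) (hs : '/' ∉ s.toList) (hp : '(' ∉ s.toList) :
    cleanUpTrackNumberAux (m+1) s = padTrack s := by
  have hsl : PySem.Str.isIn "/" s = false := (isIn_false_iff (by decide)).2 hs
  have hpad : PySem.Str.isIn "(" (if PySem.Str.len s < 2 then "0" ++ s else s) = false := by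
    refine (isIn_false_iff (c := '(') (by decide)).2 (fun hmem => ?_)
    rcases mem_pad hmem with h | h
    · exact absurd h (by decide)
    · exact hp h
  simp only [cleanUpTrackNumberAux, padTrack, hsl, Bool.false_eq_true, if_false, hpad,
    Option.map_some]

-- proof-local name for A's/B's shared first stage (the slash branch)
def step1? (track : String) : Option String :=
  if PySem.Str.isIn "/" track then
    match PySem.Int.ofStr? (PySem.Str.slice track (some 0) (some (PySem.Str.find track "/"))) with
    | none => none
    | some n =>
      if n < 10 then
        match PySem.Str.pyGet? (PySem.Str.slice track (some 0) (some (PySem.Str.find track "/"))) 0 with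
        | none => none
        | some c =>
          if c != '0' then some ("0" ++ PySem.Str.slice track (some 0) (some (PySem.Str.find track "/")))
          else some (PySem.Str.slice track (some 0) (some (PySem.Str.find track "/")))
      else some (PySem.Str.slice track (some 0) (some (PySem.Str.find track "/")))
  else some track

lemma auxA_eq (f : Nat) (track : String) : cleanUpTrackNumberAux (f+1) track =
    match step1? track with
    | none => none
    | some t1 =>
      if PySem.Str.isIn "(" (if PySem.Str.len t1 < 2 then "0" ++ t1 else t1) then
        if PySem.Str.isIn ","
            (PySem.Str.replace (PySem.Str.replace (if PySem.Str.len t1 < 2 then "0" ++ t1 else t1) "(" "") ")" "") then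
          cleanUpTrackNumberAux f
            (PySem.Str.slice
              (PySem.Str.replace (PySem.Str.replace (if PySem.Str.len t1 < 2 then "0" ++ t1 else t1) "(" "") ")" "")
              (some 0)
              (some (PySem.Str.find
                (PySem.Str.replace (PySem.Str.replace (if PySem.Str.len t1 < 2 then "0" ++ t1 else t1) "(" "") ")" "")
                ",")))
        else none
      else some (if PySem.Str.len t1 < 2 then "0" ++ t1 else t1) := rfl

lemma padTrack_eq (track : String) : padTrack track =
    (step1? track).map (fun u => if PySem.Str.len u < 2 then "0" ++ u else u) := by
  unfold padTrack step1?
  cases hsl : PySem.Str.isIn "/" track with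
  | false => simp
  | true =>
    simp only [if_true]
    cases hof : PySem.Int.ofStr? (PySem.Str.slice track (some 0) (some (PySem.Str.find track "/"))) with
    | none => simp
    | some n =>
      by_cases hn : n < 10
      · simp only [hn, if_true]
        cases hg : PySem.Str.pyGet? (PySem.Str.slice track (some 0) (some (PySem.Str.find track "/"))) 0 with
        | none => simp [hn]
        | some ch => by_cases h0 : ch = '0' <;> simp [hn, h0]
      · simp [hn]

-- step1? never returns a string containing '/'
lemma step1_no_slash {track t1 : String} (h : step1? track = some t1) : '/' ∉ t1.toList := by
  unfold step1? at h
  split at h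
  case isTrue hsl =>
    have hpmem : '/' ∉ (PySem.Str.slice track (some 0) (some (PySem.Str.find track "/"))).toList :=
      not_mem_slice_find (by decide) hsl
    split at h
    · exact absurd h (by simp)
    · split at h
      · split at h
        · exact absurd h (by simp)
        · split at h
          · cases h
            intro hmem
            rw [String.toList_append] at hmem
            rcases List.mem_append.1 hmem with h | h
            · have h0l : ("0" : String).toList = ['0'] := by decide
              rw [h0l] at h; simp at h
            · exact hpmem h
          · cases h; exact hpmem
      · cases h; exact hpmem
  case isFalse hsl =>
    cases h
    have hsl' : PySem.Str.isIn "/" track = false := by simpa using hsl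
    exact (isIn_false_iff (c := '/') (by decide)).1 hsl'

-- a successful step1? keeps the input's characters (up to the '0' pads), so a '(' in the
-- padded result forces the original track to be nonempty
lemma step1_len {track t1 : String} (h : step1? track = some t1)
    (hp : PySem.Str.isIn "(" (if PySem.Str.len t1 < 2 then "0" ++ t1 else t1) = true) :
    1 ≤ track.toList.length := by
  by_cases hsl : PySem.Str.isIn "/" track = true
  · have hmem : '/' ∈ track.toList := (isIn_true_iff (c := '/') (by decide)).1 hsl
    have := List.length_pos_of_mem hmem; omega
  · simp only [Bool.not_eq_true] at hsl
    unfold step1? at h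
    simp only [hsl, Bool.false_eq_true, if_false, Option.some.injEq] at h
    subst h
    have hmem := (isIn_true_iff (c := '(') (by decide)).1 hp
    rcases mem_pad hmem with h | h
    · exact absurd h (by decide)
    · have := List.length_pos_of_mem h; omega

-- the common tail after the first slash/length normalisation
lemma tail_eq (fuel : Nat) (t2 : String) (h2 : '/' ∉ t2.toList)
    (hf : PySem.Str.isIn "(" t2 = true → 1 ≤ fuel) :
    (if PySem.Str.isIn "(" t2 then
       if PySem.Str.isIn "," (PySem.Str.replace (PySem.Str.replace t2 "(" "") ")" "") then
         cleanUpTrackNumberAux fuel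
           (PySem.Str.slice (PySem.Str.replace (PySem.Str.replace t2 "(" "") ")" "") (some 0)
             (some (PySem.Str.find (PySem.Str.replace (PySem.Str.replace t2 "(" "") ")" "") ",")))
       else none
     else some t2)
    =
    (if PySem.Str.isIn "(" t2 then
       if PySem.Str.isIn "," (PySem.Str.replace (PySem.Str.replace t2 "(" "") ")" "") then
         padTrack (PySem.Str.slice (PySem.Str.replace (PySem.Str.replace t2 "(" "") ")" "") (some 0)
           (some (PySem.Str.find (PySem.Str.replace (PySem.Str.replace t2 "(" "") ")" "") ",")))
       else none
     else some t2) := by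
  cases hparen : PySem.Str.isIn "(" t2 with
  | false => simp
  | true =>
    obtain ⟨m, rfl⟩ : ∃ m, fuel = m + 1 := ⟨fuel - 1, by have := hf hparen; omega⟩
    simp only [if_true]
    set r := PySem.Str.replace (PySem.Str.replace t2 "(" "") ")" "" with hr
    cases hc : PySem.Str.isIn "," r with
    | false => simp
    | true =>
      simp only [if_true]
      set arg := PySem.Str.slice r (some 0) (some (PySem.Str.find r ",")) with harg
      have hrparen : '(' ∉ r.toList := fun hmem => by
        rcases mem_replace hmem with h | h
        · exact not_mem_replace_self (by decide) (by decide) h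
        · simp at h
      have hrslash : '/' ∉ r.toList := fun hmem => by
        rcases mem_replace hmem with h | h
        · rcases mem_replace h with h | h
          · exact h2 h
          · simp at h
        · simp at h
      exact core_eq m arg (fun h => hrslash (mem_of_mem_strSlice h))
        (fun h => hrparen (mem_of_mem_strSlice h))

-- ===== VERDICT (by name: the statement is the Claim_ definition above) =====
theorem cleanUpTrackNumber_spec : Claim_equal_cleanUpTrackNumber := by
  intro track _ hpre
  unfold Spec_cleanUpTrackNumber cleanUpTrackNumber cleanUpTrackNumber_alt
  congr 1
  rw [auxA_eq, padTrack_eq]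
  cases hstep : step1? track with
  | none => simp
  | some t1 =>
    simp only [Option.map_some, Option.bind_some]
    refine tail_eq _ _ (fun hmem => ?_) (fun hparen => step1_len hstep hparen)
    rcases mem_pad hmem with h | h
    · exact absurd h (by decide)
    · exact step1_no_slash hstep h
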